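-- pv_equiv track=rewrite | github.com/ghadj/Cat-V1-Simple-Cell | v1_simple_cell/utils.py | get_index_bounds
-- ===== SOURCE A (Python) =====
-- def get_index_bounds(indexes):
--     """Returns the bounds (first and last element) of consecutive numbers.
--
--     Example:
--     [1 , 3, 4, 5, 7, 8, 9, 10] -> [1, 3, 5, 7, 10]
--
--     Args:
--         indexes (list of int): integers in an ascending order.
--
--     Returns:
--         list of int: the bounds (first and last element) of consecutive numbers.
--     """
--
--     index_bounds = [indexes[0]]
--
--     for i, v in enumerate(indexes):
--         if i == len(indexes)-1:
--             index_bounds.append(v)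
--             break
--
--         if v+1 == indexes[i+1]:
--             continue
--         else:
--             index_bounds.append(v)
--             index_bounds.append(indexes[i+1])
--
--     return index_bounds
-- ===== SOURCE B (Python) =====
-- def get_index_bounds(indexes):
--     """Group indexes into runs of consecutive integers, then emit each run's
--     first and last element. Returns [] for empty input."""
--     runs = []
--     for x in indexes:
--         if runs and x == runs[-1][-1] + 1:
--             runs[-1].append(x)
--         else:
--             runs.append([x])
--     out = []
--     for run in runs:
--         out.append(run[0])
--         out.append(run[-1])
--     return out
-- ===== Notes on version B (the rewrite author's own statement) =====
-- stated objective: alternative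
-- what changed: Replaces A's single interleaved look-ahead/break loop over enumerate with a two-pass decomposition: first partition the list into runs of consecutive integers, then flatten each run to its first and last element.
import Mathlib
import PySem

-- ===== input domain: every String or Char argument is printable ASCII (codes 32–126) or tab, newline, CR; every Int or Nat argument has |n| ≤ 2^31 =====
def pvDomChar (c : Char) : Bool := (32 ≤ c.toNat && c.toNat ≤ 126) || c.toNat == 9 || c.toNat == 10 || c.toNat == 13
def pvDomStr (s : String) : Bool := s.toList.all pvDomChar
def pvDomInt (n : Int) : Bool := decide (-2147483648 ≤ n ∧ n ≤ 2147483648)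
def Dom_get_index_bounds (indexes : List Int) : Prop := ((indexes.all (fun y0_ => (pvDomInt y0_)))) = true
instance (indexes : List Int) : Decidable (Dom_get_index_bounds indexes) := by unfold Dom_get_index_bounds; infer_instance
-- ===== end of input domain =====

-- B replaces A's interleaved look-ahead/break loop with a two-pass decomposition
-- (partition into consecutive runs, then flatten each run to first/last); same O(n) cost.

-- ===== PORT A =====
-- loop over `for i, v in enumerate(indexes)` (i = current index, the list argument is the suffix)
def pvLoopA (indexes : List Int) (acc : List Int) (i : Nat) : List Int → List Int
  | [] => acc
  | v :: rest =>
      if i = indexes.length - 1 then acc ++ [v]          -- append v; break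
      else
        match PySem.List.pyGet? indexes ((i : Int) + 1) with
        | some nxt =>
            if v + 1 = nxt then pvLoopA indexes acc (i + 1) rest                  -- continue
            else pvLoopA indexes (acc ++ [v, nxt]) (i + 1) rest                   -- append v, indexes[i+1]
        | none => acc                                     -- IndexError (unreachable inside the loop)

def get_index_bounds (indexes : List Int) : List Int :=
  match indexes with
  | [] => []                                              -- Python raises IndexError on indexes[0]; excluded by Pre_
  | x :: _ => pvLoopA indexes [x] 0 indexes

-- ===== PORT B =====
-- one step of B's first loop: extend the last run or start a new one
def pvStepB (runs : List (List Int)) (x : Int) : List (List Int) :=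
  match runs.getLast? with
  | some r =>
      match r.getLast? with
      | some l => if x = l + 1 then runs.dropLast ++ [r ++ [x]] else runs ++ [[x]]
      | none => runs ++ [[x]]                             -- unreachable: runs never holds an empty run
  | none => runs ++ [[x]]

def get_index_bounds_alt (indexes : List Int) : List Int :=
  let runs := indexes.foldl pvStepB []
  runs.foldl (fun out run => out ++ [run.headD 0, run.getLastD 0]) []
  -- run[0] / run[-1]: every run is nonempty, so headD/getLastD defaults are never used

-- ===== PRECONDITION & SPEC =====
-- A raises IndexError on the empty list (indexes[0]); that is the only exclusion.
def Pre_get_index_bounds (indexes : List Int) : Prop := indexes ≠ []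
instance (indexes : List Int) : Decidable (Pre_get_index_bounds indexes) := by unfold Pre_get_index_bounds; infer_instance
def pvWitness_get_index_bounds : List Int := [1, 3, 4, 5, 7, 8, 9, 10]

def Spec_get_index_bounds (indexes : List Int) (out : List Int) : Prop := out = get_index_bounds_alt indexes
instance (indexes : List Int) (out : List Int) : Decidable (Spec_get_index_bounds indexes out) := by unfold Spec_get_index_bounds; infer_instance

-- ===== CLAIM (what is proved, stated in full; the proofs are below) =====
def Claim_equal_get_index_bounds : Prop := ∀ (indexes : List Int), Dom_get_index_bounds indexes → Pre_get_index_bounds indexes → Spec_get_index_bounds indexes (get_index_bounds indexes)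

-- ===== LEMMAS AND PROOFS =====

-- common characterisation: pvEmit v rest = the bounds emitted after the first element,
-- scanning consecutive pairs (v, w)
def pvEmit (v : Int) : List Int → List Int
  | [] => [v]
  | w :: ws => (if v + 1 = w then [] else [v, w]) ++ pvEmit w ws

lemma pvLoopA_spec (rest : List Int) : ∀ (pre : List Int) (v : Int) (acc : List Int),
    pvLoopA (pre ++ v :: rest) acc pre.length (v :: rest) = acc ++ pvEmit v rest := by
  induction rest with
  | nil =>
      intro pre v acc
      simp [pvLoopA, pvEmit]
  | cons w ws ih =>
      intro pre v acc
      have hlen : pre.length ≠ (pre ++ v :: w :: ws).length - 1 := by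
        simp only [List.length_append, List.length_cons]; omega
      have hget : PySem.List.pyGet? (pre ++ v :: w :: ws) ((pre.length : Int) + 1) = some w := by
        have h1 : ((pre.length : Int) + 1) = ((pre.length + 1 : Nat) : Int) := by push_cast; ring
        rw [h1, PySem.List.pyGet?_natCast]
        rw [List.getElem?_append_right (by omega)]
        simp
      have hre : ∀ acc', pvLoopA (pre ++ v :: w :: ws) acc' (pre.length + 1) (w :: ws) =
          acc' ++ pvEmit w ws := by
        intro acc'
        have := ih (pre ++ [v]) w acc'
        simpa using this
      rw [pvLoopA, if_neg hlen, hget]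
      simp only [pvEmit]
      by_cases hc : v + 1 = w
      · rw [if_pos hc, if_pos hc, hre acc]
        simp
      · rw [if_neg hc, if_neg hc, hre (acc ++ [v, w])]
        simp

lemma portA_emit (x : Int) (xs : List Int) :
    get_index_bounds (x :: xs) = x :: pvEmit x xs := by
  have := pvLoopA_spec xs [] x [x]
  simpa [get_index_bounds] using this

def pvFlat (runs : List (List Int)) : List Int :=
  runs.foldl (fun out run => out ++ [run.headD 0, run.getLastD 0]) []

lemma pvFlat_snoc (rs : List (List Int)) (r : List Int) :
    pvFlat (rs ++ [r]) = pvFlat rs ++ [r.headD 0, r.getLastD 0] := by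
  simp [pvFlat, List.foldl_append]

lemma pvFoldB_spec (xs : List Int) : ∀ (rs : List (List Int)) (r : List Int), r ≠ [] →
    pvFlat (List.foldl pvStepB (rs ++ [r]) xs) = pvFlat rs ++ [r.headD 0] ++ pvEmit (r.getLastD 0) xs := by
  induction xs with
  | nil =>
      intro rs r hr
      simp [pvFlat_snoc, pvEmit]
  | cons w ws ih =>
      intro rs r hr
      have hlast : (rs ++ [r]).getLast? = some r := by simp
      have hrl : r.getLast? = some (r.getLastD 0) := by
        cases h : r.getLast? with
        | none => exact absurd (List.getLast?_eq_none_iff.mp h) hr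
        | some l => simp [List.getLastD_eq_getLast?, h]
      have hdrop : (rs ++ [r]).dropLast = rs := by simp
      by_cases hc : w = r.getLastD 0 + 1
      · have hstep : pvStepB (rs ++ [r]) w = rs ++ [r ++ [w]] := by
          simp only [pvStepB, hlast, hrl, hdrop]
          rw [if_pos hc]
        have hne : r ++ [w] ≠ [] := by simp
        have hIH := ih rs (r ++ [w]) hne
        simp only [List.foldl_cons, hstep]
        rw [hIH]
        have hhead : (r ++ [w]).headD 0 = r.headD 0 := by
          cases r with
          | nil => exact absurd rfl hr
          | cons a as => simp
        have hlast2 : (r ++ [w]).getLastD 0 = w := by simp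
        rw [hhead, hlast2]
        have hemit : pvEmit (r.getLastD 0) (w :: ws) = pvEmit w ws := by
          simp only [pvEmit]
          rw [if_pos hc.symm]
          simp
        rw [hemit]
      · have hstep : pvStepB (rs ++ [r]) w = (rs ++ [r]) ++ [[w]] := by
          simp only [pvStepB, hlast, hrl, hdrop]
          rw [if_neg hc]
        have hIH := ih (rs ++ [r]) [w] (by simp)
        simp only [List.foldl_cons, hstep]
        rw [hIH, pvFlat_snoc]
        have hemit : pvEmit (r.getLastD 0) (w :: ws) = r.getLastD 0 :: w :: pvEmit w ws := by
          have hne : ¬ (r.getLastD 0 + 1 = w) := fun h => hc h.symm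
          simp only [pvEmit]
          rw [if_neg hne]
          simp
        rw [hemit]
        simp

lemma portB_emit (x : Int) (xs : List Int) :
    get_index_bounds_alt (x :: xs) = x :: pvEmit x xs := by
  have hstep0 : pvStepB [] x = [[x]] := by simp [pvStepB]
  have hmain := pvFoldB_spec xs [] [x] (by simp)
  simp only [get_index_bounds_alt, List.foldl_cons, hstep0]
  calc pvFlat (List.foldl pvStepB ([] ++ [[x]]) xs)
      = pvFlat [] ++ [([x] : List Int).headD 0] ++ pvEmit (([x] : List Int).getLastD 0) xs := hmain
    _ = x :: pvEmit x xs := by simp [pvFlat]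

-- ===== VERDICT (by name: the statement is the Claim_ definition above) =====
theorem get_index_bounds_spec : Claim_equal_get_index_bounds := by
  intro indexes _ hpre
  unfold Spec_get_index_bounds
  cases indexes with
  | nil => exact absurd rfl hpre
  | cons x xs => rw [portA_emit, portB_emit]
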